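/-
  GENERATED by c/gen_symbols.py from toyh.sym (the PROGRAM only (the base is in the shared library)) — do not edit; re-run the script when the image is re-linked.

  `Symbols`: one number per symbol of the image. `symbols`: this build. `Symbols.rt`: the runtime's entry points as the
  parameter record of Asan/Runtime.lean. `Symbols.image`: the `Image` for given file bytes.
-/
import Asan.Runtime
import ProgX.Base.Symbols
import ProgX.Start
namespace Toyh

/-- The symbols of the image (`nm`): functions, named objects, section marks. -/
structure Symbols where
  /-- `clamp_length`: function (static), 27 bytes -/
  clamp_length : Nat
  /-- `_sub_I_65535_1`: function (static), 24 bytes -/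
  sub_I_65535_1 : Nat
  /-- `__text_end`: function -/
  text_end : Nat
  /-- `__rodata_start`: read-only mark / object -/
  rodata_start : Nat
  /-- `__rodata_end`: read-only mark / object -/
  rodata_end : Nat
  /-- `__data_start`: data mark / object -/
  data_start : Nat
  /-- `__data_end`: data mark / object -/
  data_end : Nat
  /-- `__bss_start`: bss mark / object -/
  bss_start : Nat
  /-- `runs`: bss object (static), 8 bytes -/
  runs : Nat
  /-- `__bss_end`: bss mark / object -/
  bss_end : Nat
  /-- `__image_end`: bss mark / object -/
  image_end : Nat

/-- The addresses of this build (toyh.sym). -/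
def symbols : Symbols where
  clamp_length := 0x1050e0
  sub_I_65535_1 := 0x105180
  text_end := 0x105220
  rodata_start := 0x141100
  rodata_end := 0x141160
  data_start := 0x141600
  data_end := 0x141680
  bss_start := 0x141900
  runs := 0x141900
  bss_end := 0x141940
  image_end := 0x141940

/-- The runtime's entry points, for the contracts of Asan/Runtime.lean. -/
def Symbols.rt (S : Symbols) : Asan.RtSymbols where
  report := UInt64.ofNat ProgX.Base.symbols.asan_report
  rangeBad := UInt64.ofNat ProgX.Base.symbols.range_bad
  load1 := UInt64.ofNat ProgX.Base.symbols.asan_load1_noabort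
  store1 := UInt64.ofNat ProgX.Base.symbols.asan_store1_noabort
  load2 := UInt64.ofNat ProgX.Base.symbols.asan_load2_noabort
  store2 := UInt64.ofNat ProgX.Base.symbols.asan_store2_noabort
  load4 := UInt64.ofNat ProgX.Base.symbols.asan_load4_noabort
  store4 := UInt64.ofNat ProgX.Base.symbols.asan_store4_noabort
  load8 := UInt64.ofNat ProgX.Base.symbols.asan_load8_noabort
  store8 := UInt64.ofNat ProgX.Base.symbols.asan_store8_noabort
  load16 := UInt64.ofNat ProgX.Base.symbols.asan_load16_noabort
  store16 := UInt64.ofNat ProgX.Base.symbols.asan_store16_noabort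
  storeN := UInt64.ofNat ProgX.Base.symbols.asan_storeN_noabort
  arenaUnpoison := UInt64.ofNat ProgX.Base.symbols.arena_unpoison
  arenaPoison := UInt64.ofNat ProgX.Base.symbols.arena_poison
  registerGlobals := UInt64.ofNat ProgX.Base.symbols.asan_register_globals
  ctor := UInt64.ofNat S.sub_I_65535_1
  runCtors := UInt64.ofNat ProgX.Base.symbols.run_ctors
  initArrayStart := ProgX.Base.symbols.init_array_start
  initArrayEnd := ProgX.Base.symbols.init_array_end

/-- The `Image` of ProgX/Start.lean for the file bytes `bytes` (toyh.bin) and these symbols. -/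
def Symbols.image (S : Symbols) (bytes : Array UInt8) : ProgX.Image where
  bytes := bytes
  imageEnd := S.image_end
  textEnd := ProgX.Base.symbols.text_cap
  entry := UInt64.ofNat ProgX.Base.symbols.start
  exit := UInt64.ofNat ProgX.Base.symbols.prog_exit
  report := UInt64.ofNat ProgX.Base.symbols.asan_report

end Toyh
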